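-- pv_equiv track=rewrite | github.com/giriaryan694-a11y/NumHunter | numhunter.py | guess_numbers
-- ===== SOURCE A (Python) =====
-- import itertools
--
-- def guess_numbers(pattern):
--     x_count = 0
--     for char in reversed(pattern):
--         if char.lower() == 'x':
--             x_count += 1
--         else:
--             break
--     prefix = pattern[:-x_count] if x_count > 0 else pattern
--     return [''.join([prefix]+list(p)) for p in itertools.product('0123456789', repeat=x_count)]
-- ===== SOURCE B (Python) =====
-- def guess_numbers(pattern):
--     x_count = 0
--     for char in reversed(pattern):
--         if char.lower() == 'x':
--             x_count += 1
--         else: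
--             break
--     prefix = pattern[:-x_count] if x_count > 0 else pattern
--     results = []
--     for i in range(10 ** x_count):
--         s = ''
--         n = i
--         for _ in range(x_count):
--             s = chr(ord('0') + n % 10) + s
--             n //= 10
--         results.append(prefix + s)
--     return results
-- ===== Notes on version B (the rewrite author's own statement) =====
-- stated objective: alternative
-- what changed: Replaces itertools.product over digit tuples by counting the integers 0..10^k-1 and converting each to a zero-padded base-10 suffix with a hand-written modulo/division digit loop.
import Mathlib
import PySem

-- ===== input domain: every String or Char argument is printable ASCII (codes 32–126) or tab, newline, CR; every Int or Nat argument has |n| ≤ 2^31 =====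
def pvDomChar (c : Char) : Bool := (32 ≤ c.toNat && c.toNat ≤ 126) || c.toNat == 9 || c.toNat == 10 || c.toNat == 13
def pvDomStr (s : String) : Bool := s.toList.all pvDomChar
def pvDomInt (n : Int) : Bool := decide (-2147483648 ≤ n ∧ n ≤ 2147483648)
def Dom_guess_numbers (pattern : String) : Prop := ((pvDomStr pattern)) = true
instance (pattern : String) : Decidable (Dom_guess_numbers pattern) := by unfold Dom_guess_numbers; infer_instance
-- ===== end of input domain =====

-- B enumerates the integers 0..10^k-1 and formats each as a zero-padded base-10 suffix
-- (modulo/division digit loop) instead of taking the cartesian product of digit tuples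
-- (objective: alternative algorithm, same output order and cost).

-- ===== PORT A =====
-- the trailing-x counting loop ('for char in reversed(pattern): if char.lower()=='x': … else break'),
-- transcribed as structural recursion on the reversed character list (shared by both ports,
-- as in the two Pythons).
def pvCountX : List Char → Nat
  | [] => 0
  | c :: rest => if PySem.Chars.lowerChar c = 'x' then pvCountX rest + 1 else 0

-- itertools.product('0123456789', repeat=n) in its lexicographic order, on code points
def pvDigits : List Char := ['0','1','2','3','4','5','6','7','8','9']

def pvProd : Nat → List (List Char)
  | 0 => [[]]
  | n + 1 => pvDigits.flatMap (fun d => (pvProd n).map (fun p => d :: p))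

-- strings handled on code points (List Char); ''.join([prefix]+list(p)) is pre ++ p
def guess_numbers (pattern : String) : List String :=
  let xs := pattern.toList
  let x_count := pvCountX xs.reverse
  let pre := if x_count > 0 then PySem.List.slice xs none (some (-(x_count : Int))) else xs
  (pvProd x_count).map (fun p => String.ofList (pre ++ p))

-- ===== PORT B =====
-- the inner loop 'for _ in range(k): s = chr(ord('0') + n % 10) + s; n //= 10' over state (n, s);
-- n is a natural number (starts at i ∈ range(10^k)), so Python's // and % are Nat division/modulo
def pvPadLoop : Nat → Nat → List Char → List Char
  | 0, _, s => s
  | k + 1, n, s => pvPadLoop k (n / 10) (Char.ofNat (48 + n % 10) :: s)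

-- 'results = []; for i in range(10 ** x_count): … results.append(prefix + s)' as a foldl
def guess_numbers_alt (pattern : String) : List String :=
  let xs := pattern.toList
  let x_count := pvCountX xs.reverse
  let pre := if x_count > 0 then PySem.List.slice xs none (some (-(x_count : Int))) else xs
  (List.range (10 ^ x_count)).foldl
    (fun acc i => acc ++ [String.ofList (pre ++ pvPadLoop x_count i [])]) []

-- ===== PRECONDITION & SPEC =====
def Spec_guess_numbers (pattern : String) (out : List String) : Prop := out = guess_numbers_alt pattern
instance (pattern : String) (out : List String) : Decidable (Spec_guess_numbers pattern out) := by unfold Spec_guess_numbers; infer_instance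

-- ===== CLAIM =====
def Claim_equal_guess_numbers : Prop := ∀ (pattern : String), Dom_guess_numbers pattern → Spec_guess_numbers pattern (guess_numbers pattern)

-- ===== LEMMAS AND PROOFS =====
-- zero-padded k-digit decimal representation, most significant digit first
def pvPadSpec : Nat → Nat → List Char
  | 0, _ => []
  | k + 1, n => pvPadSpec k (n / 10) ++ [Char.ofNat (48 + n % 10)]

theorem pvPadLoop_eq (k : Nat) : ∀ n s, pvPadLoop k n s = pvPadSpec k n ++ s := by
  induction k with
  | zero => intro n s; simp [pvPadLoop, pvPadSpec]
  | succ k ih => intro n s; simp [pvPadLoop, pvPadSpec, ih]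

-- itertools.product in snoc form: the last position varies fastest
theorem pvProd_snoc (n : Nat) :
    pvProd (n + 1) = (pvProd n).flatMap (fun p => pvDigits.map (fun d => p ++ [d])) := by
  induction n with
  | zero => decide
  | succ n ih =>
    conv_lhs => rw [pvProd, ih]
    rw [pvProd]
    simp [List.map_flatMap, List.flatMap_map, List.flatMap_assoc, List.map_map, Function.comp_def]

theorem range_mul_ten (m : Nat) :
    List.range (m * 10) = (List.range m).flatMap (fun q => (List.range 10).map (fun d => q * 10 + d)) := by
  induction m with
  | zero => simp
  | succ m ih =>
    have h1 : (m + 1) * 10 = m * 10 + 10 := by ring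
    have h2 : List.range (m + 1) = List.range m ++ [m] := List.range_succ
    rw [h1, List.range_add, ih, h2, List.flatMap_append, List.flatMap_cons, List.flatMap_nil,
      List.append_nil]

theorem map_pvPadSpec_range (k : Nat) :
    (List.range (10 ^ k)).map (pvPadSpec k) = pvProd k := by
  induction k with
  | zero => decide
  | succ k ih =>
    have hpow : 10 ^ (k + 1) = 10 ^ k * 10 := pow_succ 10 k
    have hdig : pvDigits = (List.range 10).map (fun d => Char.ofNat (48 + d)) := by decide
    rw [hpow, range_mul_ten, pvProd_snoc, ← ih, List.map_flatMap, List.flatMap_map, hdig]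
    apply List.flatMap_congr
    intro q _
    simp only [List.map_map]
    apply List.map_congr_left
    intro d hd
    have hd10 : d < 10 := List.mem_range.mp hd
    have hdiv : (q * 10 + d) / 10 = q := by omega
    have hmod : (q * 10 + d) % 10 = d := by omega
    simp [Function.comp_def, pvPadSpec, hdiv, hmod]

theorem foldl_append_map {α β : Type} (f : α → β) (l : List α) :
    ∀ acc : List β, l.foldl (fun a i => a ++ [f i]) acc = acc ++ l.map f := by
  induction l with
  | nil => intro acc; simp
  | cons x xs ih => intro acc; simp [List.foldl, ih]

-- ===== VERDICT =====
theorem guess_numbers_spec : Claim_equal_guess_numbers := by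
  intro pattern _
  unfold Spec_guess_numbers guess_numbers guess_numbers_alt
  simp only [foldl_append_map, List.nil_append, pvPadLoop_eq, List.append_nil,
    ← map_pvPadSpec_range, List.map_map, Function.comp_def]
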